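-- pv_equiv track=rewrite | github.com/arose13/RefChecker | refchecker/aggregator.py | strict_agg
-- ===== SOURCE A (Python) =====
-- def strict_agg(results):
--     """Aggregate results by zero-tolerance on negative labels."""
--     if not results:
--         return "Abstain"
--
--     if all(len(result) == 1 for result in results):
--         for i in range(len(results)):
--             if len(results[i]) == 1:
--                 results[i] = results[i][0]
--
--     ret = "Entailment"
--     for result in results:
--         if result == "Contradiction":
--             return "Contradiction"
--         if result == "Neutral":
--             ret = "Neutral"
--     return ret
-- ===== SOURCE B (Python) =====
-- def strict_agg(results):
--     """Aggregate results by zero-tolerance on negative labels."""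
--     if not results:
--         return "Abstain"
--     if all(len(result) == 1 for result in results):
--         for i in range(len(results)):
--             results[i] = results[i][0]
--     # reduce to a numeric severity and take the worst; a non-string element
--     # (list) never equals a label, so it ranks 0 like any unknown label
--     worst = max(2 if r == "Contradiction" else 1 if r == "Neutral" else 0
--                 for r in results)
--     return ("Entailment", "Neutral", "Contradiction")[worst]
-- ===== Notes on version B (the rewrite author's own statement) =====
-- stated objective: alternative
-- what changed: Replaces A's early-return loop holding a string sentinel with a numeric reduction: each element is mapped to a severity rank (Contradiction=2, Neutral=1, else 0), max() takes the worst, and a tuple lookup maps the rank back to the label; empty-input guard and in-place singleton flattening are kept.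
import Mathlib
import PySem

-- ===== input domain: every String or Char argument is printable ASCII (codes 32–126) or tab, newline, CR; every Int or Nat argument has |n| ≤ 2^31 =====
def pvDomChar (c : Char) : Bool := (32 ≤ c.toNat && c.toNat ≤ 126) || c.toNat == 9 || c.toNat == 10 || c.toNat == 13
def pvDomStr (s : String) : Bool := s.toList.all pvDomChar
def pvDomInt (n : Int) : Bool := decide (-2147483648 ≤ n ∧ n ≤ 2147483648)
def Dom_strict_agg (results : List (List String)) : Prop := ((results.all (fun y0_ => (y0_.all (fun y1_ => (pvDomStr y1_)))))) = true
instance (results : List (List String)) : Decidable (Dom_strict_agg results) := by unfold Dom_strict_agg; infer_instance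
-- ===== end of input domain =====

-- B replaces A's early-return loop with a string sentinel by a numeric severity
-- reduction (max of ranks) plus a table lookup; same return value, and B performs
-- the same in-place normalization of the caller's list (equivalence proved here is
-- about the return value).

-- ===== PORT A =====
-- A's final loop with the `ret` accumulator; when the lists were flattened in place,
-- the elements compared against "Contradiction"/"Neutral" are the extracted strings.
def strictAggLoop (rs : List String) (ret : String) : String :=
  match rs with
  | [] => ret
  | r :: t =>
    if r = "Contradiction" then "Contradiction"
    else if r = "Neutral" then strictAggLoop t "Neutral"
    else strictAggLoop t ret

def strict_agg (results : List (List String)) : String :=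
  if results = [] then "Abstain"
  else if results.all (fun r => r.length = 1) then
    -- Python reassigned results[i] := results[i][0]; the loop then compares strings
    strictAggLoop (results.map (fun r => r.headD "")) "Entailment"
  else
    -- elements stay lists; `result == "Contradiction"` / `== "Neutral"` are always False
    -- in Python (list vs str), so the loop falls through with ret = "Entailment"
    "Entailment"

-- ===== PORT B =====
-- Source B's per-element severity rank: 2 if r == "Contradiction" else 1 if r == "Neutral" else 0
def sevRank (r : String) : Int :=
  if r = "Contradiction" then 2 else if r = "Neutral" then 1 else 0

def strict_agg_alt (results : List (List String)) : String :=
  if results = [] then "Abstain"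
  else
    -- worst = max(rank(r) for r in results); the generator is nonempty and every
    -- rank is ≥ 0, so Python's max equals a fold of `max` from 0
    let worst : Int :=
      if results.all (fun r => r.length = 1) then
        -- flattened in place; the elements ranked are the extracted strings
        (results.map (fun r => sevRank (r.headD ""))).foldl max 0
      else
        -- elements stay lists; a list never equals a label string in Python, rank 0
        (results.map (fun _ => (0 : Int))).foldl max 0
    -- ("Entailment", "Neutral", "Contradiction")[worst]
    if worst = 2 then "Contradiction" else if worst = 1 then "Neutral" else "Entailment"

-- ===== PRECONDITION & SPEC =====
def Spec_strict_agg (results : List (List String)) (out : String) : Prop := out = strict_agg_alt results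
instance (results : List (List String)) (out : String) : Decidable (Spec_strict_agg results out) := by unfold Spec_strict_agg; infer_instance

-- ===== CLAIM (what is proved, stated in full; the proofs are below) =====
def Claim_equal_strict_agg : Prop := ∀ (results : List (List String)), Dom_strict_agg results → Spec_strict_agg results (strict_agg results)

-- ===== LEMMAS AND PROOFS =====
-- A's loop returns by membership priority
theorem strictAggLoop_char (rs : List String) (ret : String) :
    strictAggLoop rs ret =
      if "Contradiction" ∈ rs then "Contradiction"
      else if "Neutral" ∈ rs then "Neutral" else ret := by
  induction rs generalizing ret with
  | nil => simp [strictAggLoop]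
  | cons r t ih =>
    by_cases hc : r = "Contradiction"
    · simp [strictAggLoop, hc]
    · by_cases hn : r = "Neutral"
      · simp only [strictAggLoop, hn, if_true, ih, List.mem_cons]
        split_ifs <;> simp_all
      · simp only [strictAggLoop, hc, hn, if_false, ih, List.mem_cons]
        split_ifs <;> simp_all

-- B's fold computes the worst severity, characterised by membership
theorem foldMax_char (rs : List String) (a : Int) (ha : 0 ≤ a) :
    (rs.map sevRank).foldl max a =
      if "Contradiction" ∈ rs then max a 2
      else if "Neutral" ∈ rs then max a 1 else a := by
  induction rs generalizing a with
  | nil => simp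
  | cons r t ih =>
    have hs : 0 ≤ sevRank r := by unfold sevRank; split_ifs <;> omega
    rw [List.map_cons, List.foldl_cons, ih (max a (sevRank r)) (by omega)]
    by_cases hc : r = "Contradiction"
    · subst hc
      simp only [sevRank, if_true, List.mem_cons, true_or]
      split_ifs <;> omega
    · have hc' : ¬ ("Contradiction" = r) := fun h => hc h.symm
      by_cases hn : r = "Neutral"
      · subst hn
        simp only [sevRank, reduceIte, List.mem_cons, true_or]
        split_ifs <;> simp_all
      · have hn' : ¬ ("Neutral" = r) := fun h => hn h.symm
        simp only [sevRank, hc, hn, if_false, List.mem_cons, hc', hn', false_or]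
        split_ifs <;> omega

theorem foldMax_zeros (n : Nat) :
    List.foldl max (0 : Int) (List.replicate n 0) = 0 := by
  induction n with
  | zero => simp
  | succ n ih => simpa [List.replicate_succ] using ih

-- ===== VERDICT (by name: the statement is the Claim_ definition above) =====
theorem strict_agg_spec : Claim_equal_strict_agg := by
  intro results _
  unfold Spec_strict_agg strict_agg strict_agg_alt
  by_cases he : results = []
  · simp [he]
  · by_cases hall : results.all (fun r => r.length = 1)
    · have hmap : results.map (fun r => sevRank (r.headD "")) =
        (results.map (fun r => r.headD "")).map sevRank := by simp
      simp only [he, hall, if_false, if_true, hmap, strictAggLoop_char,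
        foldMax_char (results.map (fun r => r.headD "")) 0 le_rfl]
      split_ifs <;> simp_all
    · simp [he, hall, foldMax_zeros]
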